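-- pv_equiv track=rewrite | github.com/msorbi/hdsner-utils | src/merge_labels.py | merge_iob_labels
-- ===== SOURCE A (Python) =====
-- def merge_iob_labels(pers_labels, loc_labels):
--     """
--     Merge two IOB label sequences (PERS and LOC) into a single sequence based on specified rules.
--
--     Parameters:
--     - pers_labels: List of IOB labels for the PERS class.
--     - loc_labels: List of IOB labels for the LOC class.
--
--     Returns:
--     - merged_labels: List of merged IOB labels.
--     """
--     n = len(pers_labels)
--     merged_labels = ['O'] * n
--     i = 0
--
--     while i < n:
--         # Determine if a PERS span starts at position i
--         if pers_labels[i].startswith('B-'):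
--             pers_start = i
--             pers_end = i + 1
--             while pers_end < n and pers_labels[pers_end].startswith('I-'):
--                 pers_end += 1
--         else:
--             pers_start = pers_end = None
--
--         # Determine if a LOC span starts at position i
--         if loc_labels[i].startswith('B-'):
--             loc_start = i
--             loc_end = i + 1
--             while loc_end < n and loc_labels[loc_end].startswith('I-'):
--                 loc_end += 1
--         else:
--             loc_start = loc_end = None
--
--         # Decide which span to select based on the rules
--         if pers_start is not None and loc_start is not None:
--             if pers_start < loc_start:
--                 selected_start, selected_end, selected_type = pers_start, pers_end, 'PERS'
--             elif loc_start < pers_start: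
--                 selected_start, selected_end, selected_type = loc_start, loc_end, 'LOC'
--             else:  # Starts are equal
--                 pers_length = pers_end - pers_start
--                 loc_length = loc_end - loc_start
--                 if pers_length > loc_length:
--                     selected_start, selected_end, selected_type = pers_start, pers_end, 'PERS'
--                 elif loc_length > pers_length:
--                     selected_start, selected_end, selected_type = loc_start, loc_end, 'LOC'
--                 else:
--                     selected_start, selected_end, selected_type = pers_start, pers_end, 'PERS'
--         elif pers_start is not None:
--             selected_start, selected_end, selected_type = pers_start, pers_end, 'PERS'
--         elif loc_start is not None:
--             selected_start, selected_end, selected_type = loc_start, loc_end, 'LOC'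
--         else:
--             i += 1
--             continue
--
--         # Assign labels to the merged sequence
--         merged_labels[selected_start] = f'B-{selected_type}'
--         for j in range(selected_start + 1, selected_end):
--             merged_labels[j] = f'I-{selected_type}'
--
--         # Advance the index to the end of the selected span
--         i = selected_end
--
--     return merged_labels
-- ===== SOURCE B (Python) =====
-- def _spans(labels, n):
--     """Map each 'B-' start index below n to its span end (start + following 'I-' run)."""
--     spans = {}
--     i = 0
--     while i < n:
--         if labels[i].startswith('B-'):
--             j = i + 1
--             while j < n and labels[j].startswith('I-'):
--                 j += 1
--             spans[i] = j
--             i = j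
--         else:
--             i += 1
--     return spans
--
--
-- def merge_iob_labels(pers_labels, loc_labels):
--     n = len(pers_labels)
--     pers = _spans(pers_labels, n)
--     loc = _spans(loc_labels, n)
--     out = []
--     i = 0
--     while i < n:
--         pe = pers.get(i)
--         le = loc.get(i)
--         if pe is None and le is None:
--             out.append('O')
--             i += 1
--         else:
--             if le is None or (pe is not None and pe >= le):
--                 end, typ = pe, 'PERS'
--             else:
--                 end, typ = le, 'LOC'
--             out.append('B-' + typ)
--             out.extend(['I-' + typ] * (end - i - 1))
--             i = end
--     return out
-- ===== Notes on version B (the rewrite author's own statement) =====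
-- stated objective: alternative
-- what changed: B first extracts every B-span of the first n positions as a start->end dict per label sequence in one pass each, then a single merge pass builds the output list front-to-back by appending from dict lookups, instead of A's preallocated in-place array with inline span re-scanning and index assignment at each position.
-- outside the precondition, e.g. on merge_iob_labels(['B-PERS', 'I-PERS'], ['O']): A returns ['B-PERS', 'I-PERS'], B raises IndexError
import Mathlib
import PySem

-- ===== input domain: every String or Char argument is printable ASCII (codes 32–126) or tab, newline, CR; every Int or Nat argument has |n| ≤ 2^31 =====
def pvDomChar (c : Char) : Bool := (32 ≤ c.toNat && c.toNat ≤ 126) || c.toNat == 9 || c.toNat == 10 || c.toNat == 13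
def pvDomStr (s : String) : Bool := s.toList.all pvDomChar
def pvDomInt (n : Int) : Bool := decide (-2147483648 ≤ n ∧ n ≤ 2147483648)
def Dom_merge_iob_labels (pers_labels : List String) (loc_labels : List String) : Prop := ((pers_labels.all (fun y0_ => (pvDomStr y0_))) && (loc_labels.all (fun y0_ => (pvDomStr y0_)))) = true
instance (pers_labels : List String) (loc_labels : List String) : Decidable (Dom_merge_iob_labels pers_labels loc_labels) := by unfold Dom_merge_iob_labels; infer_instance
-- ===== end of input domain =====

-- B extracts each sequence's B-spans into a start->end dict in one pass, then one monotone
-- merge pass builds the output front-to-back by appending, instead of A's preallocated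
-- in-place array with inline span re-scanning; alternative structure, same cost.


-- ===== PORT A =====
-- A's inner 'while end < n and labels[end].startswith("I-")' (index in range under Pre_: e < n = labels.length, so getD is exact).
def pvScanA (labels : List String) (n : Nat) (e : Nat) : Nat :=
  if _h : e < n then
    if PySem.Str.startswith (labels.getD e "") "I-" then pvScanA labels n (e + 1) else e
  else e
termination_by n - e

-- A's 'for j in range(selected_start + 1, selected_end): merged_labels[j] = ...' (j < n always, so List.set is exact).
def pvFillA (typ : String) (j e : Nat) (merged : List String) : List String :=
  if _h : j < e then pvFillA typ (j + 1) e (merged.set j ("I-" ++ typ)) else merged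
termination_by e - j

-- A's main 'while i < n' loop; fuel is only a totality guard (i strictly increases each
-- iteration, so fuel = n never runs out when started at i = 0).
def pvMergeA (pers loc : List String) (n : Nat) : Nat → Nat → List String → List String
  | 0, _, merged => merged
  | fuel + 1, i, merged =>
    if i < n then
      let pers_end? : Option Nat :=
        if PySem.Str.startswith (pers.getD i "") "B-" then some (pvScanA pers n (i + 1)) else none
      let loc_end? : Option Nat :=
        if PySem.Str.startswith (loc.getD i "") "B-" then some (pvScanA loc n (i + 1)) else none
      -- A's selection; pers_start = loc_start = i, so A's strict start comparisons compare i with i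
      let sel : Option (Nat × String) :=
        match pers_end?, loc_end? with
        | some pe, some le =>
            if i < i then some (pe, "PERS")
            else if i < i then some (le, "LOC")
            else if pe - i > le - i then some (pe, "PERS")
            else if le - i > pe - i then some (le, "LOC")
            else some (pe, "PERS")
        | some pe, none => some (pe, "PERS")
        | none, some le => some (le, "LOC")
        | none, none => none
      match sel with
      | none => pvMergeA pers loc n fuel (i + 1) merged
      | some (e, typ) =>
          pvMergeA pers loc n fuel e (pvFillA typ (i + 1) e (merged.set i ("B-" ++ typ)))
    else merged

def merge_iob_labels (pers_labels : List String) (loc_labels : List String) : List String :=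
  let n := pers_labels.length
  pvMergeA pers_labels loc_labels n n 0 (List.replicate n "O")

-- ===== PORT B =====
-- B's _spans inner while loop.
def pvScanB (labels : List String) (n : Nat) (e : Nat) : Nat :=
  if _h : e < n then
    if PySem.Str.startswith (labels.getD e "") "I-" then pvScanB labels n (e + 1) else e
  else e
termination_by n - e

-- B's _spans outer while loop (fuel = totality guard, i strictly increases).
def pvSpansB (labels : List String) (n : Nat) : Nat → Nat → PySem.Dict Nat Nat → PySem.Dict Nat Nat
  | 0, _, d => d
  | fuel + 1, i, d =>
    if i < n then
      if PySem.Str.startswith (labels.getD i "") "B-" then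
        let j := pvScanB labels n (i + 1)
        pvSpansB labels n fuel j (d.insert i j)
      else pvSpansB labels n fuel (i + 1) d
    else d

-- B's merge while loop, appending to the output (fuel = totality guard).
def pvMergeB (persD locD : PySem.Dict Nat Nat) (n : Nat) : Nat → Nat → List String → List String
  | 0, _, out => out
  | fuel + 1, i, out =>
    if i < n then
      match persD.get? i, locD.get? i with
      | none, none => pvMergeB persD locD n fuel (i + 1) (out ++ ["O"])
      | pe?, le? =>
          let sel : Nat × String :=
            if le? = none ∨ (pe? ≠ none ∧ le?.getD 0 ≤ pe?.getD 0)
            then (pe?.getD 0, "PERS") else (le?.getD 0, "LOC")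
          pvMergeB persD locD n fuel sel.1
            (out ++ ("B-" ++ sel.2) :: List.replicate (sel.1 - i - 1) ("I-" ++ sel.2))
    else out

def merge_iob_labels_alt (pers_labels : List String) (loc_labels : List String) : List String :=
  let n := pers_labels.length
  let pers := pvSpansB pers_labels n n 0 PySem.Dict.empty
  let loc := pvSpansB loc_labels n n 0 PySem.Dict.empty
  pvMergeB pers loc n n 0 []

-- ===== PRECONDITION & SPEC =====
-- A reads loc_labels only at indices below len(pers_labels); Pre_ requires loc_labels to
-- reach that far. On shorter loc_labels A raises IndexError on most inputs, and where a
-- PERS span happens to jump the loop past the short tail A still returns — an accident of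
-- which indices its loop touches; B raises IndexError there too (see the excluded example
-- in the claim).
def Pre_merge_iob_labels (pers_labels : List String) (loc_labels : List String) : Prop :=
  pers_labels.length ≤ loc_labels.length
instance (pers_labels : List String) (loc_labels : List String) : Decidable (Pre_merge_iob_labels pers_labels loc_labels) := by unfold Pre_merge_iob_labels; infer_instance

def pvWitness_merge_iob_labels : List String × List String :=
  (["B-PERS", "I-PERS", "O"], ["O", "B-LOC", "I-LOC"])

def Spec_merge_iob_labels (pers_labels : List String) (loc_labels : List String) (out : List String) : Prop := out = merge_iob_labels_alt pers_labels loc_labels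
instance (pers_labels : List String) (loc_labels : List String) (out : List String) : Decidable (Spec_merge_iob_labels pers_labels loc_labels out) := by unfold Spec_merge_iob_labels; infer_instance

-- ===== CLAIM (what is proved, stated in full; the proofs are below) =====
def Claim_equal_merge_iob_labels : Prop := ∀ (pers_labels : List String) (loc_labels : List String), Dom_merge_iob_labels pers_labels loc_labels → Pre_merge_iob_labels pers_labels loc_labels → Spec_merge_iob_labels pers_labels loc_labels (merge_iob_labels pers_labels loc_labels)

-- ===== LEMMAS AND PROOFS =====

theorem pvScanB_eq (labels : List String) (n e : Nat) : pvScanB labels n e = pvScanA labels n e := by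
  unfold pvScanB pvScanA
  split_ifs with h1 h2
  · exact pvScanB_eq labels n (e + 1)
  · rfl
  · rfl
termination_by n - e

theorem pvScanA_ge (labels : List String) (n e : Nat) : e ≤ pvScanA labels n e := by
  unfold pvScanA
  split_ifs with h1 h2
  · exact Nat.le_trans (Nat.le_succ e) (pvScanA_ge labels n (e + 1))
  · exact Nat.le_refl e
  · exact Nat.le_refl e
termination_by n - e

theorem pvScanA_le (labels : List String) (n e : Nat) (he : e ≤ n) : pvScanA labels n e ≤ n := by
  unfold pvScanA
  split_ifs with h1 h2
  · exact pvScanA_le labels n (e + 1) h1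
  · exact he
  · exact he
termination_by n - e

theorem pvScanA_interior (labels : List String) (n e k : Nat) (h1 : e ≤ k)
    (h2 : k < pvScanA labels n e) :
    PySem.Str.startswith (labels.getD k "") "I-" = true := by
  rw [pvScanA] at h2
  split_ifs at h2 with hn hI
  · rcases Nat.eq_or_lt_of_le h1 with rfl | hlt
    · exact hI
    · exact pvScanA_interior labels n (e + 1) k hlt h2
  · omega
  · omega
termination_by n - e

theorem pvI_not_B (s : String) (h : PySem.Str.startswith s "I-" = true) :
    PySem.Str.startswith s "B-" = false := by
  simp only [PySem.Str.startswith_eq] at h ⊢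
  rw [PySem.Chars.startswith_iff] at h
  by_contra hb
  rw [Bool.not_eq_false, PySem.Chars.startswith_iff] at hb
  have hI : ("I-" : String).toList = ['I', '-'] := rfl
  have hB : ("B-" : String).toList = ['B', '-'] := rfl
  rw [hI] at h; rw [hB] at hb
  cases hs : s.toList with
  | nil => rw [hs] at h; exact absurd h (by simp)
  | cons a t =>
    rw [hs] at h hb
    rw [List.cons_prefix_cons] at h hb
    exact absurd (h.1 ▸ hb.1) (by decide)

-- Characterisation of B's span dict: keys are exactly the B- positions below n,
-- each mapped to its scan end.
theorem pvSpans_get (labels : List String) (n i : Nat) :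
    ∀ fuel s d, n - s ≤ fuel →
    (pvSpansB labels n fuel s d).get? i =
      if s ≤ i ∧ i < n ∧ PySem.Str.startswith (labels.getD i "") "B-" = true
      then some (pvScanA labels n (i + 1))
      else d.get? i := by
  intro fuel
  induction fuel with
  | zero =>
      intro s d hf
      have hs : n ≤ s := by omega
      simp only [pvSpansB]
      rw [if_neg (by rintro ⟨h1, h2, h3⟩; omega)]
  | succ f ih =>
      intro s d hf
      simp only [pvSpansB]
      by_cases hsn : s < n
      · rw [if_pos hsn]
        by_cases hB : PySem.Str.startswith (labels.getD s "") "B-" = true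
        · rw [if_pos hB]
          have hge : s + 1 ≤ pvScanB labels n (s + 1) := by
            rw [pvScanB_eq]; exact pvScanA_ge labels n (s + 1)
          rw [ih (pvScanB labels n (s + 1)) _ (by omega)]
          by_cases hc : pvScanB labels n (s + 1) ≤ i ∧ i < n ∧
              PySem.Str.startswith (labels.getD i "") "B-" = true
          · rw [if_pos hc, if_pos ⟨by omega, hc.2.1, hc.2.2⟩]
          · rw [if_neg hc]
            by_cases his : i = s
            · subst his
              rw [PySem.Dict.get?_insert_self, if_pos ⟨Nat.le_refl i, hsn, hB⟩, pvScanB_eq]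
            · rw [PySem.Dict.get?_insert_of_ne _ _ his]
              rw [if_neg]
              intro ⟨h1, h2, h3⟩
              by_cases hij : i < pvScanB labels n (s + 1)
              · have : PySem.Str.startswith (labels.getD i "") "I-" = true := by
                  apply pvScanA_interior labels n (s + 1) i (by omega)
                  rw [← pvScanB_eq]; exact hij
                rw [pvI_not_B _ this] at h3
                exact absurd h3 (by simp)
              · exact hc ⟨by omega, h2, h3⟩
        · rw [if_neg hB]
          rw [ih (s + 1) d (by omega)]
          by_cases hc : s + 1 ≤ i ∧ i < n ∧
              PySem.Str.startswith (labels.getD i "") "B-" = true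
          · rw [if_pos hc, if_pos ⟨by omega, hc.2.1, hc.2.2⟩]
          · rw [if_neg hc, if_neg]
            intro ⟨h1, h2, h3⟩
            rcases Nat.eq_or_lt_of_le h1 with rfl | hlt
            · exact hB h3
            · exact hc ⟨by omega, h2, h3⟩
      · rw [if_neg hsn, if_neg (by rintro ⟨h1, h2, h3⟩; omega)]

-- Setting the element just past a prefix.
theorem pvSetMid (pre rest : List String) (x v : String) :
    (pre ++ x :: rest).set pre.length v = pre ++ v :: rest := by
  simp

-- The preallocated array after the I- writes equals the written chunk appended to the prefix.
theorem pvFillA_eq (typ : String) (e j : Nat) (q : List String) (m : Nat)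
    (hq : q.length = j) (hje : j ≤ e) (hm : e - j ≤ m) :
    pvFillA typ j e (q ++ List.replicate m "O")
      = q ++ List.replicate (e - j) ("I-" ++ typ) ++ List.replicate (m - (e - j)) "O" := by
  rw [pvFillA]
  split_ifs with h
  · obtain ⟨m', rfl⟩ : ∃ m', m = m' + 1 := ⟨m - 1, by omega⟩
    have hset : (q ++ List.replicate (m' + 1) "O").set j ("I-" ++ typ)
        = (q ++ ["I-" ++ typ]) ++ List.replicate m' "O" := by
      rw [List.replicate_succ, ← hq, pvSetMid]
      simp
    rw [hset, pvFillA_eq typ e (j + 1) (q ++ ["I-" ++ typ]) m' (by simp [hq]) (by omega) (by omega)]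
    have h1 : e - j = (e - (j + 1)) + 1 := by omega
    have h2 : m' + 1 - ((e - (j + 1)) + 1) = m' - (e - (j + 1)) := by omega
    rw [h1, h2, List.replicate_succ]
    simp
  · have h0 : e - j = 0 := by omega
    rw [h0]
    simp
termination_by e - j

-- Main loop correspondence: A's loop on 'pre ++ (unwritten "O" suffix)' equals B's
-- appending loop on 'pre', given dicts characterised as B-span maps.
theorem pvMerge_eq (pers loc : List String) (n : Nat)
    (persD locD : PySem.Dict Nat Nat)
    (HP : ∀ i, i < n → persD.get? i =
      (if PySem.Str.startswith (pers.getD i "") "B-" then some (pvScanA pers n (i + 1)) else none))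
    (HL : ∀ i, i < n → locD.get? i =
      (if PySem.Str.startswith (loc.getD i "") "B-" then some (pvScanA loc n (i + 1)) else none)) :
    ∀ fuel i (pre : List String), pre.length = i → i ≤ n → n - i ≤ fuel →
    pvMergeA pers loc n fuel i (pre ++ List.replicate (n - i) "O")
      = pvMergeB persD locD n fuel i pre := by
  intro fuel
  induction fuel with
  | zero =>
      intro i pre hpre hin hf
      have : i = n := by omega
      subst this
      simp [pvMergeA, pvMergeB]
  | succ f ih =>
      intro i pre hpre hin hf
      by_cases hi : i < n
      · have hrep : List.replicate (n - i) "O" = "O" :: List.replicate (n - i - 1) "O" := by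
          have : n - i = (n - i - 1) + 1 := by omega
          rw [this, List.replicate_succ]
          simp
        have step : ∀ (e : Nat) (typ : String), i + 1 ≤ e → e ≤ n →
            pvMergeA pers loc n f e
              (pvFillA typ (i + 1) e ((pre ++ List.replicate (n - i) "O").set i ("B-" ++ typ)))
              = pvMergeB persD locD n f e
                  (pre ++ ("B-" ++ typ) :: List.replicate (e - i - 1) ("I-" ++ typ)) := by
          intro e typ h1e h2e
          have hset : (pre ++ List.replicate (n - i) "O").set i ("B-" ++ typ)
              = (pre ++ ["B-" ++ typ]) ++ List.replicate (n - i - 1) "O" := by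
            rw [hrep, ← hpre, pvSetMid]
            simp
          rw [hset, pvFillA_eq typ e (i + 1) _ (n - i - 1) (by simp [hpre]) h1e (by omega)]
          have hch : (pre ++ ["B-" ++ typ]) ++ List.replicate (e - (i + 1)) ("I-" ++ typ)
                ++ List.replicate ((n - i - 1) - (e - (i + 1))) "O"
              = (pre ++ ("B-" ++ typ) :: List.replicate (e - i - 1) ("I-" ++ typ))
                ++ List.replicate (n - e) "O" := by
            have h1 : (n - i - 1) - (e - (i + 1)) = n - e := by omega
            have h2 : e - (i + 1) = e - i - 1 := by omega
            rw [h1, h2]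
            simp
          rw [hch]
          exact ih e _ (by simp [hpre]; omega) h2e (by omega)
        rw [pvMergeA, pvMergeB, if_pos hi, if_pos hi, HP i hi, HL i hi]
        by_cases hBp : PySem.Str.startswith (pers.getD i "") "B-" = true
        · by_cases hBl : PySem.Str.startswith (loc.getD i "") "B-" = true
          · rw [if_pos hBp, if_pos hBl]
            dsimp only
            rw [if_neg (Nat.lt_irrefl i), if_neg (Nat.lt_irrefl i)]
            have hpe := pvScanA_ge pers n (i + 1)
            have hle := pvScanA_ge loc n (i + 1)
            have hpn := pvScanA_le pers n (i + 1) (by omega)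
            have hln := pvScanA_le loc n (i + 1) (by omega)
            set pe := pvScanA pers n (i + 1) with hpedef
            set le := pvScanA loc n (i + 1) with hledef
            by_cases hgt : pe - i > le - i
            · rw [if_pos hgt, if_pos (Or.inr ⟨by simp, by simp only [Option.getD_some]; omega⟩)]
              exact step pe "PERS" hpe hpn
            · rw [if_neg hgt]
              by_cases hlt : le - i > pe - i
              · rw [if_pos hlt, if_neg ?_]
                · exact step le "LOC" hle hln
                · rintro (h | ⟨-, h⟩)
                  · exact absurd h (by simp)
                  · simp only [Option.getD_some] at h
                    omega
              · rw [if_neg hlt, if_pos (Or.inr ⟨by simp, by simp only [Option.getD_some]; omega⟩)]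
                exact step pe "PERS" hpe hpn
          · rw [if_pos hBp, if_neg hBl]
            dsimp only
            rw [if_pos (Or.inl rfl)]
            exact step (pvScanA pers n (i + 1)) "PERS" (pvScanA_ge pers n (i + 1))
              (pvScanA_le pers n (i + 1) (by omega))
        · by_cases hBl : PySem.Str.startswith (loc.getD i "") "B-" = true
          · rw [if_neg hBp, if_pos hBl]
            dsimp only
            rw [if_neg ?_]
            · exact step (pvScanA loc n (i + 1)) "LOC" (pvScanA_ge loc n (i + 1))
                (pvScanA_le loc n (i + 1) (by omega))
            · rintro (h | ⟨h, -⟩)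
              · exact absurd h (by simp)
              · exact h rfl
          · rw [if_neg hBp, if_neg hBl]
            dsimp only
            rw [hrep, ← hpre]
            have hsh : pre ++ "O" :: List.replicate (n - i - 1) "O"
                = (pre ++ ["O"]) ++ List.replicate (n - (i + 1)) "O" := by
              have : n - i - 1 = n - (i + 1) := by omega
              rw [this]
              simp
            rw [hpre, hsh]
            exact ih (i + 1) (pre ++ ["O"]) (by simp [hpre]) (by omega) (by omega)
      · have : i = n := by omega
        subst this
        simp [pvMergeA, pvMergeB]

theorem merge_iob_labels_spec_aux (pers loc : List String)
    (_hlen : pers.length ≤ loc.length) :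
    merge_iob_labels pers loc = merge_iob_labels_alt pers loc := by
  unfold merge_iob_labels merge_iob_labels_alt
  have HP : ∀ i, i < pers.length →
      (pvSpansB pers pers.length pers.length 0 PySem.Dict.empty).get? i =
        (if PySem.Str.startswith (pers.getD i "") "B-" then
          some (pvScanA pers pers.length (i + 1)) else none) := by
    intro i hi
    rw [pvSpans_get pers pers.length i pers.length 0 PySem.Dict.empty (by omega)]
    by_cases hB : PySem.Str.startswith (pers.getD i "") "B-" = true
    · rw [if_pos ⟨Nat.zero_le i, hi, hB⟩, if_pos hB]
    · rw [if_neg (by rintro ⟨-, -, h⟩; exact hB h), if_neg hB, PySem.Dict.get?_empty]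
  have HL : ∀ i, i < pers.length →
      (pvSpansB loc pers.length pers.length 0 PySem.Dict.empty).get? i =
        (if PySem.Str.startswith (loc.getD i "") "B-" then
          some (pvScanA loc pers.length (i + 1)) else none) := by
    intro i hi
    rw [pvSpans_get loc pers.length i pers.length 0 PySem.Dict.empty (by omega)]
    by_cases hB : PySem.Str.startswith (loc.getD i "") "B-" = true
    · rw [if_pos ⟨Nat.zero_le i, hi, hB⟩, if_pos hB]
    · rw [if_neg (by rintro ⟨-, -, h⟩; exact hB h), if_neg hB, PySem.Dict.get?_empty]
  have hmain := pvMerge_eq pers loc pers.length _ _ HP HL pers.length 0 []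
    rfl (Nat.zero_le _) (by omega)
  simpa using hmain

-- ===== VERDICT (by name: the statement is the Claim_ definition above) =====
theorem merge_iob_labels_spec : Claim_equal_merge_iob_labels := by
  intro pers loc _hdom hpre
  exact merge_iob_labels_spec_aux pers loc hpre
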